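-- pv_equiv track=rewrite | github.com/pypi-data/pypi-mirror-402 | packages/moderndid/moderndid-0.0.3-py3-none-any.whl/moderndid/didhonest/utils.py | _create_consecutive_groups
-- ===== SOURCE A (Python) =====
-- def _create_consecutive_groups(unique_values, bin_size, prefix):
--     """Create groups of consecutive values based on prefix."""
--     n_values = len(unique_values)
--     groups = []
--
--     if prefix == "!!":
--         for i in range(n_values - 1, -1, -bin_size):
--             group_start = max(0, i - bin_size + 1)
--             groups.append(unique_values[group_start : i + 1])
--     elif prefix == "!":
--         for i in range(0, n_values, bin_size):
--             groups.append(unique_values[i : i + bin_size])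
--     else:
--         for i in range(0, n_values, bin_size):
--             groups.append(unique_values[i : i + bin_size])
--
--     return groups
-- ===== SOURCE B (Python) =====
-- def _create_consecutive_groups(unique_values, bin_size, prefix):
--     """Create groups of consecutive values based on prefix."""
--
--     def chunk(vals, first):
--         if not vals:
--             return []
--         return [vals[:first]] + chunk(vals[first:], bin_size)
--
--     if prefix == "!!":
--         # groups are aligned to the END of the list: the leftover (len % bin_size)
--         # values form the head chunk, and the group list is reported back-to-front
--         first = len(unique_values) % bin_size or bin_size
--         return list(reversed(chunk(unique_values, first)))
--     return chunk(unique_values, bin_size)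
-- ===== Notes on version B (the rewrite author's own statement) =====
-- stated objective: alternative
-- what changed: A walks index strides with range() and slices (a clamped backward walk for '!!'); B peels chunks by structural recursion on the list, and derives the '!!' end-alignment arithmetically (first chunk = len % bin_size or bin_size) followed by one reversal of the group list, with no backward traversal and no clamping.
-- outside the precondition, e.g. on _create_consecutive_groups([1, 2, 3], -2, '!'): A returns [], B raises RecursionError
import Mathlib
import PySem

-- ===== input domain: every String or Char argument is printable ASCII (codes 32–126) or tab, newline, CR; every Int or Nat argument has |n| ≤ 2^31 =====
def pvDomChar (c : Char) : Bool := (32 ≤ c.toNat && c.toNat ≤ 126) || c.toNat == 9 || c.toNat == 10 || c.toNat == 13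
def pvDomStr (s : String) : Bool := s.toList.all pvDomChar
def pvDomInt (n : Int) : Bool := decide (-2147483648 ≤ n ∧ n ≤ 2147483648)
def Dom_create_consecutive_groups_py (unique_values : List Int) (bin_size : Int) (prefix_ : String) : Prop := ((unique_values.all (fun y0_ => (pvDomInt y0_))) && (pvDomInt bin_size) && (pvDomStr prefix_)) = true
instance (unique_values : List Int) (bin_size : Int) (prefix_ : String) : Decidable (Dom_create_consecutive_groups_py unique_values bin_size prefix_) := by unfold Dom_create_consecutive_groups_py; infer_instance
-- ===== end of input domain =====

-- B replaces A's index-stride loops over range() (a clamped backward walk for '!!') by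
-- structural recursion peeling one chunk at a time, deriving the '!!' end-alignment
-- arithmetically (first chunk = len % bin_size or bin_size) and reversing the group list once.

-- ===== PORT A =====
def create_consecutive_groups_py (unique_values : List Int) (bin_size : Int) (prefix_ : String) : List (List Int) :=
  let n_values : Int := unique_values.length
  if prefix_ = "!!" then
    (PySem.List.pyRange (n_values - 1) (-1) (-bin_size)).foldl
      (fun groups i =>
        let group_start := max 0 (i - bin_size + 1)
        groups ++ [PySem.List.slice unique_values (some group_start) (some (i + 1))]) []
  else if prefix_ = "!" then
    (PySem.List.pyRange 0 n_values bin_size).foldl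
      (fun groups i => groups ++ [PySem.List.slice unique_values (some i) (some (i + bin_size))]) []
  else
    (PySem.List.pyRange 0 n_values bin_size).foldl
      (fun groups i => groups ++ [PySem.List.slice unique_values (some i) (some (i + bin_size))]) []

-- ===== PORT B =====
-- Source B's inner recursive 'chunk(vals, first)'; general recursion is ported with a fuel
-- argument (fuel = vals.length at the call site): each Python call consumes first ≥ 1
-- elements, so the fuel is never exhausted on the inputs where Python terminates.
def pvChunk (bin_size : Int) : Nat → List Int → Int → List (List Int)
  | _, [], _ => []
  | 0, _, _ => []
  | f + 1, vals, first =>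
      [PySem.List.slice vals none (some first)] ++
        pvChunk bin_size f (PySem.List.slice vals (some first) none) bin_size

def create_consecutive_groups_py_alt (unique_values : List Int) (bin_size : Int) (prefix_ : String) : List (List Int) :=
  if prefix_ = "!!" then
    -- first = len(unique_values) % bin_size or bin_size
    (pvChunk bin_size unique_values.length unique_values
        (if PySem.Int.mod (unique_values.length : Int) bin_size ≠ 0
         then PySem.Int.mod (unique_values.length : Int) bin_size
         else bin_size)).reverse
  else
    pvChunk bin_size unique_values.length unique_values bin_size

-- ===== PRECONDITION & SPEC =====
-- Pre_ excludes bin_size ≤ 0: at bin_size = 0 Python A raises ValueError (range() step 0),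
-- and a negative bin_size is outside the natural domain of a chunk size — A returns []
-- there only as an accident of range() stepping, while B's recursion does not terminate
-- (RecursionError).
def Pre_create_consecutive_groups_py (unique_values : List Int) (bin_size : Int) (prefix_ : String) : Prop :=
  1 ≤ bin_size
instance (unique_values : List Int) (bin_size : Int) (prefix_ : String) : Decidable (Pre_create_consecutive_groups_py unique_values bin_size prefix_) := by unfold Pre_create_consecutive_groups_py; infer_instance

def pvWitness_create_consecutive_groups_py : List Int × Int × String := ([1, 2, 3, 4, 5], 2, "!!")

def Spec_create_consecutive_groups_py (unique_values : List Int) (bin_size : Int) (prefix_ : String) (out : List (List Int)) : Prop := out = create_consecutive_groups_py_alt unique_values bin_size prefix_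
instance (unique_values : List Int) (bin_size : Int) (prefix_ : String) (out : List (List Int)) : Decidable (Spec_create_consecutive_groups_py unique_values bin_size prefix_ out) := by unfold Spec_create_consecutive_groups_py; infer_instance

-- ===== CLAIM (what is proved, stated in full; the proofs are below) =====
def Claim_equal_create_consecutive_groups_py : Prop := ∀ (unique_values : List Int) (bin_size : Int) (prefix_ : String), Dom_create_consecutive_groups_py unique_values bin_size prefix_ → Pre_create_consecutive_groups_py unique_values bin_size prefix_ → Spec_create_consecutive_groups_py unique_values bin_size prefix_ (create_consecutive_groups_py unique_values bin_size prefix_)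

-- ===== LEMMAS AND PROOFS =====

-- Proof-side chunking spec in pure Nat/List terms ('max 1 c' only forces termination;
-- it is invisible for the c ≥ 1 both ports use).
def chunksW (B : Nat) : List Int → Nat → List (List Int)
  | [], _ => []
  | x :: xs, c => (x :: xs).take (max 1 c) :: chunksW B ((x :: xs).drop (max 1 c)) B
  termination_by l _ => l.length
  decreasing_by simp

-- first-chunk size of the end-aligned ('!!') grouping
def rFor (B n : Nat) : Nat := if n % B = 0 then B else n % B

lemma chunksW_nil (B c : Nat) : chunksW B [] c = [] := by
  rw [chunksW.eq_def]

lemma chunksW_cons' (B : Nat) (l : List Int) (hl : l ≠ []) (c : Nat) (hc : 1 ≤ c) :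
    chunksW B l c = l.take c :: chunksW B (l.drop c) B := by
  cases l with
  | nil => exact absurd rfl hl
  | cons x xs =>
      rw [chunksW.eq_def]
      dsimp only
      rw [Nat.max_eq_right hc]

lemma rFor_pos (B n : Nat) (hB : 1 ≤ B) : 1 ≤ rFor B n := by
  unfold rFor; split
  · exact hB
  · next h => exact Nat.pos_of_ne_zero h

lemma rFor_le (B n : Nat) (hB : 1 ≤ B) : rFor B n ≤ B := by
  unfold rFor; split
  · exact le_refl B
  · exact le_of_lt (Nat.mod_lt _ (by omega))

-- B's fueled recursion computes chunksW whenever the fuel covers the list.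
lemma pvChunk_eq_chunksW (bs : Int) (hbs : 1 ≤ bs) :
    ∀ (f : Nat) (vals : List Int) (c : Int), 1 ≤ c → vals.length ≤ f →
      pvChunk bs f vals c = chunksW bs.toNat vals c.toNat := by
  intro f
  induction f with
  | zero =>
      intro vals c hc hlen
      have hv : vals = [] := by cases vals <;> simp_all
      subst hv
      simp [pvChunk, chunksW_nil]
  | succ f ih =>
      intro vals c hc hlen
      cases vals with
      | nil => simp [pvChunk, chunksW_nil]
      | cons x xs =>
          have h1 : 1 ≤ c.toNat := by omega
          have hd : ((x :: xs).drop c.toNat).length ≤ f := by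
            simp only [List.length_drop, List.length_cons] at *
            omega
          rw [pvChunk, PySem.List.slice_to _ (by omega : (0:Int) ≤ c),
              PySem.List.slice_from _ (by omega : (0:Int) ≤ c),
              ih _ bs hbs hd,
              chunksW_cons' bs.toNat (x :: xs) (List.cons_ne_nil x xs) c.toNat h1]
          all_goals simp

-- A's forward loop over range(0, n, bin_size) computes chunksW.
lemma fwd_chunks (B : Nat) (hB : 1 ≤ B) :
    ∀ (n : Nat) (uv : List Int), uv.length ≤ n →
      (PySem.List.pyRange 0 (uv.length : Int) (B : Int)).map
        (fun i => PySem.List.slice uv (some i) (some (i + (B : Int)))) = chunksW B uv B := by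
  have hBpos : (0 : Int) < (B : Int) := by exact_mod_cast hB
  intro n
  induction n with
  | zero =>
      intro uv h
      have hv : uv = [] := by cases uv <;> simp_all
      subst hv
      rw [PySem.List.pyRange_of_pos _ _ hBpos]
      simp [chunksW_nil]
  | succ n ih =>
      intro uv h
      by_cases hnil : uv = []
      · subst hnil
        rw [PySem.List.pyRange_of_pos _ _ hBpos]
        simp [chunksW_nil]
      · have hlen : 0 < uv.length := by cases uv <;> simp_all
        rw [PySem.List.pyRange_of_pos _ _ hBpos, if_pos (by exact_mod_cast hlen)]
        by_cases hle : uv.length ≤ B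
        · have hcnt : ((uv.length : Int) - 0 + ↑B - 1) / ↑B = 1 := by
            rw [← PySem.Int.floordiv_eq_ediv_of_pos hBpos,
                PySem.Int.floordiv_eq_iff_of_pos hBpos]
            constructor <;> omega
          rw [hcnt]
          simp only [Int.toNat_one, List.range_one, List.map_cons, List.map_nil]
          have e2 : (0 : Int) + ↑B * ↑(0 : Nat) + ↑B = ((B : Nat) : Int) := by push_cast; ring
          have e1 : (0 : Int) + ↑B * ↑(0 : Nat) = ((0 : Nat) : Int) := by push_cast; ring
          rw [e2, e1, PySem.List.slice_natCast, chunksW_cons' _ _ hnil _ hB]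
          have hdrop : uv.drop B = [] := by
            rw [List.drop_eq_nil_iff]; omega
          rw [hdrop, chunksW_nil]
          simp
        · rw [Nat.not_le] at hle
          have hexpr : ((uv.length : Int) - 0 + ↑B - 1)
              = (((uv.length - B : Nat) : Int) - 0 + ↑B - 1) + 1 * ↑B := by omega
          have hkey : ((uv.length : Int) - 0 + ↑B - 1) / ↑B
              = (((uv.length - B : Nat) : Int) - 0 + ↑B - 1) / ↑B + 1 := by
            rw [hexpr, Int.add_mul_ediv_right _ _ (by omega : (B : Int) ≠ 0)]
          have hnn : 0 ≤ (((uv.length - B : Nat) : Int) - 0 + ↑B - 1) / ↑B :=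
            Int.ediv_nonneg (by omega) (by omega)
          have htn : (((uv.length : Int) - 0 + ↑B - 1) / ↑B).toNat
              = ((((uv.length - B : Nat) : Int) - 0 + ↑B - 1) / ↑B).toNat + 1 := by
            rw [hkey]; omega
          rw [htn, List.range_succ_eq_map]
          simp only [List.map_cons, List.map_map]
          have hih := ih (uv.drop B) (by simp only [List.length_drop]; omega)
          rw [PySem.List.pyRange_of_pos _ _ hBpos] at hih
          simp only [List.length_drop] at hih
          rw [if_pos (by omega)] at hih
          rw [chunksW_cons' _ _ hnil _ hB, ← hih]
          have hhead : PySem.List.slice uv (some ((0 : Int) + ↑B * ↑(0 : Nat)))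
              (some ((0 : Int) + ↑B * ↑(0 : Nat) + ↑B)) = uv.take B := by
            have e2 : (0 : Int) + ↑B * ↑(0 : Nat) + ↑B = ((B : Nat) : Int) := by push_cast; ring
            have e1 : (0 : Int) + ↑B * ↑(0 : Nat) = ((0 : Nat) : Int) := by push_cast; ring
            rw [e2, e1, PySem.List.slice_natCast]
            simp
          rw [hhead]
          congr 1
          rw [List.map_map]
          apply List.map_congr_left
          intro k _
          show PySem.List.slice uv (some ((0:Int) + ↑B * ↑(Nat.succ k)))
                (some ((0:Int) + ↑B * ↑(Nat.succ k) + ↑B))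
             = PySem.List.slice (uv.drop B) (some ((0:Int) + ↑B * ↑k)) (some ((0:Int) + ↑B * ↑k + ↑B))
          have e1 : (0 : Int) + ↑B * ↑(Nat.succ k) = ((B * (k + 1) : Nat) : Int) := by
            push_cast; ring
          have e2 : (0 : Int) + ↑B * ↑(Nat.succ k) + ↑B = ((B * (k + 1) + B : Nat) : Int) := by
            push_cast; ring
          have e3 : (0 : Int) + ↑B * ↑k = ((B * k : Nat) : Int) := by push_cast; ring
          have e4 : (0 : Int) + ↑B * ↑k + ↑B = ((B * k + B : Nat) : Int) := by push_cast; ring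
          rw [e2, e1, e4, e3, PySem.List.slice_natCast, PySem.List.slice_natCast,
              List.drop_drop, show B * (k + 1) = B * k + B from by ring,
              Nat.add_comm (B * k) B]
          congr 1
          omega

-- With an end-aligned first chunk, the last group is exactly the final B elements.
lemma chunksW_last (B : Nat) (hB : 1 ≤ B) :
    ∀ (n : Nat) (l : List Int) (c : Nat), l.length ≤ n → 1 ≤ c → c ≤ B →
      (l.length - c) % B = 0 → B < l.length →
      chunksW B l c = chunksW B (l.take (l.length - B)) c ++ [l.drop (l.length - B)] := by
  intro n
  induction n with
  | zero => intro l c hlen _ _ _ hBl; omega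
  | succ n ih =>
      intro l c hlen hc hcB hmod hBl
      have hnil : l ≠ [] := by cases l <;> simp_all
      have hlt : (l.take (l.length - B)).length = l.length - B := by
        simp only [List.length_take]; omega
      have hnil' : l.take (l.length - B) ≠ [] := by
        intro hcon; rw [hcon] at hlt; simp at hlt; omega
      rw [chunksW_cons' _ l hnil c hc, chunksW_cons' _ _ hnil' c hc]
      by_cases hcase : B < l.length - c
      · have hmod2 : (l.length - c - B) % B = 0 := by
          have h1 : l.length - c = (l.length - c - B) + B := by omega
          have h2 := Nat.add_mod_right (l.length - c - B) B
          rw [← h1] at h2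
          omega
        have hdl : (l.drop c).length = l.length - c := by simp
        rw [ih (l.drop c) B (by rw [hdl]; omega) hB (le_refl B)
              (by rw [hdl]; exact hmod2) (by rw [hdl]; exact hcase)]
        have eA : (l.take (l.length - B)).take c = l.take c := by
          rw [List.take_take]; congr 1; omega
        have eB : (l.take (l.length - B)).drop c
            = (l.drop c).take ((l.drop c).length - B) := by
          rw [List.drop_take, hdl]; congr 1; omega
        have eC : (l.drop c).drop ((l.drop c).length - B) = l.drop (l.length - B) := by
          rw [List.drop_drop, hdl]; congr 1; omega
        rw [eA, eB, eC]
        simp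
      · have hceq : c = l.length - B := by
          have hpos : 0 < l.length - c := by omega
          rcases Nat.lt_or_ge (l.length - c) B with hlt2 | hge
          · have := Nat.mod_eq_of_lt hlt2; omega
          · omega
        have hdl : (l.drop c).length = B := by simp; omega
        have hdnil : l.drop c ≠ [] := by
          intro hcon; rw [hcon] at hdl; simp at hdl; omega
        rw [chunksW_cons' _ _ hdnil B hB]
        have e1 : (l.drop c).take B = l.drop c := List.take_of_length_le (by omega)
        have e2 : (l.drop c).drop B = [] := by rw [List.drop_eq_nil_iff]; simp; omega
        have e3 : (l.take (l.length - B)).take c = l.take (l.length - B) :=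
          List.take_of_length_le (by rw [hlt]; omega)
        have e4 : (l.take (l.length - B)).drop c = [] := by
          rw [List.drop_eq_nil_iff, hlt]; omega
        rw [e1, e2, e3, e4, chunksW_nil]
        rw [hceq]
        simp
-- Reversed-list chunking, re-reversed, is end-aligned chunking back-to-front.
lemma chunksW_revrev (B : Nat) (hB : 1 ≤ B) :
    ∀ (n : Nat) (l : List Int), l.length ≤ n →
      (chunksW B l.reverse B).map List.reverse = (chunksW B l (rFor B l.length)).reverse := by
  intro n
  induction n with
  | zero =>
      intro l h
      have hv : l = [] := by cases l <;> simp_all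
      subst hv
      simp [chunksW_nil]
  | succ n ih =>
      intro l h
      by_cases hnil : l = []
      · subst hnil; simp [chunksW_nil]
      · have hlen : 0 < l.length := by cases l <;> simp_all
        have hrnil : l.reverse ≠ [] := by simp [hnil]
        have hr1 : 1 ≤ rFor B l.length := rFor_pos B l.length hB
        by_cases hle : l.length ≤ B
        · have hrge : l.length ≤ rFor B l.length := by
            unfold rFor; split
            · exact hle
            · next hmod =>
                have hlt2 : l.length < B := by
                  rcases Nat.lt_or_ge l.length B with hx | hx
                  · exact hx
                  · have hxx : l.length = B := by omega
                    rw [hxx, Nat.mod_self] at hmod; omega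
                rw [Nat.mod_eq_of_lt hlt2]
          rw [chunksW_cons' _ _ hrnil B hB, chunksW_cons' _ _ hnil _ hr1]
          have e1 : l.reverse.take B = l.reverse := List.take_of_length_le (by simp; omega)
          have e2 : l.reverse.drop B = [] := by rw [List.drop_eq_nil_iff]; simp; omega
          have e3 : l.take (rFor B l.length) = l := List.take_of_length_le (by omega)
          have e4 : l.drop (rFor B l.length) = [] := by rw [List.drop_eq_nil_iff]; omega
          rw [e1, e2, e3, e4, chunksW_nil]
          simp
        · rw [Nat.not_le] at hle
          have hmodeq : (l.length - B) % B = l.length % B := by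
            conv_rhs => rw [show l.length = (l.length - B) + B by omega]
            rw [Nat.add_mod_right]
          have hrB : rFor B l.length ≤ B := rFor_le B l.length hB
          have hmod0 : (l.length - rFor B l.length) % B = 0 := by
            unfold rFor; split
            · next hmod => omega
            · next hmod =>
                have hdm := Nat.div_add_mod l.length B
                have hx : l.length - l.length % B = B * (l.length / B) := by omega
                rw [hx]; exact Nat.mul_mod_right _ _
          rw [chunksW_cons' _ _ hrnil B hB]
          have edrop : l.reverse.drop B = (l.take (l.length - B)).reverse := List.drop_reverse
          have etake : (l.reverse.take B).reverse = l.drop (l.length - B) := by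
            rw [List.take_reverse, List.reverse_reverse]
          have hlt : (l.take (l.length - B)).length = l.length - B := by
            simp only [List.length_take]; omega
          have ihh := ih (l.take (l.length - B)) (by rw [hlt]; omega)
          rw [hlt] at ihh
          have hrfor : rFor B (l.length - B) = rFor B l.length := by
            unfold rFor; rw [hmodeq]
          rw [hrfor] at ihh
          simp only [List.map_cons]
          rw [edrop, ihh, etake]
          rw [chunksW_last B hB l.length l (rFor B l.length) (le_refl _) hr1 hrB hmod0 hle]
          simp

-- pyRange for a negative step (no named PySem lemma covers a general negative step).
lemma pyRange_of_neg (a b : Int) {s : Int} (hs : s < 0) :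
    PySem.List.pyRange a b s =
      (List.range (if b < a then ((a - b + -s - 1) / -s).toNat else 0)).map
        (fun (k : Nat) => a + s * (k : Int)) := by
  simp only [PySem.List.pyRange, if_neg (by omega : ¬ s = 0), if_neg (by omega : ¬ (0:Int) < s)]

-- One backward clamped chunk of uv equals the matching forward chunk of uv.reverse, re-reversed.
lemma chunk_rev (uv : List Int) (i c : Nat) (hi : i < uv.length) :
    PySem.List.slice uv (some (max 0 ((uv.length : Int) - i - c))) (some ((uv.length : Int) - i))
      = ((uv.reverse.drop i).take c).reverse := by
  have h1 : uv.reverse.drop i = (uv.take (uv.length - i)).reverse := List.drop_reverse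
  have hlen : (uv.take (uv.length - i)).length = uv.length - i := by
    simp [List.length_take]
  have h2 : (uv.take (uv.length - i)).reverse.take c
      = ((uv.take (uv.length - i)).drop ((uv.length - i) - c)).reverse := by
    rw [List.take_reverse, hlen]
  have hmax : max 0 ((uv.length : Int) - i - c) = ((uv.length - i - c : Nat) : Int) := by omega
  have hto : ((uv.length : Int) - i) = ((uv.length - i : Nat) : Int) := by omega
  rw [h1, h2, List.reverse_reverse, hmax, hto, PySem.List.slice_natCast, List.drop_take]

-- A's '!!' backward clamped loop equals the forward chunking of the reversed list, each
-- chunk re-reversed (for a positive bin size).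
lemma bang_branch (uv : List Int) (bs : Int) (hb : 0 < bs) :
    (PySem.List.pyRange ((uv.length : Int) - 1) (-1) (-bs)).foldl
      (fun groups i =>
        groups ++ [PySem.List.slice uv (some (max 0 (i - bs + 1))) (some (i + 1))]) []
    = (PySem.List.pyRange 0 (uv.reverse.length : Int) bs).map
        (fun i => (PySem.List.slice uv.reverse (some i) (some (i + bs))).reverse) := by
  rw [PySem.List.foldl_append_singleton_eq_map
        (fun i => PySem.List.slice uv (some (max 0 (i - bs + 1))) (some (i + 1))),
      List.nil_append]
  rw [pyRange_of_neg _ _ (by omega : -bs < 0), PySem.List.pyRange_of_pos 0 _ hb,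
      List.length_reverse]
  by_cases hn : (0 : Int) < (uv.length : Int)
  · rw [if_pos (by omega : (-1 : Int) < (uv.length : Int) - 1), if_pos hn]
    have hcnt : (((uv.length : Int) - 1 - -1 + - -bs - 1) / - -bs)
        = (((uv.length : Int) - 0 + bs - 1) / bs) := by ring_nf
    rw [hcnt, List.map_map, List.map_map]
    apply List.map_congr_left
    intro k hk
    rw [List.mem_range] at hk
    have hk' : (k : Int) < ((uv.length : Int) - 0 + bs - 1) / bs := by omega
    have hkb : ((k : Int) + 1) * bs ≤ (uv.length : Int) + bs - 1 := by
      have := (Int.le_ediv_iff_mul_le hb).mp (by omega : (k : Int) + 1 ≤ ((uv.length : Int) - 0 + bs - 1) / bs)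
      omega
    have hlt : bs * (k : Int) < (uv.length : Int) := by nlinarith
    have hge : (0 : Int) ≤ bs * (k : Int) := by positivity
    have hi : (((bs * (k : Int)).toNat : Int)) = bs * (k : Int) := Int.toNat_of_nonneg hge
    have hc : ((bs.toNat : Int)) = bs := Int.toNat_of_nonneg (by omega)
    have hiN : (bs * (k : Int)).toNat < uv.length := by omega
    show PySem.List.slice uv (some (max 0 ((uv.length : Int) - 1 + -bs * k - bs + 1)))
          (some ((uv.length : Int) - 1 + -bs * k + 1))
        = (PySem.List.slice uv.reverse (some (0 + bs * k)) (some (0 + bs * k + bs))).reverse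
    have e1 : (uv.length : Int) - 1 + -bs * (k : Int) - bs + 1
        = (uv.length : Int) - ((bs * (k : Int)).toNat : Int) - ((bs.toNat : Int)) := by
      rw [hi, hc]; ring
    have e2 : (uv.length : Int) - 1 + -bs * (k : Int) + 1
        = (uv.length : Int) - ((bs * (k : Int)).toNat : Int) := by
      rw [hi]; ring
    have e3 : (0 : Int) + bs * (k : Int) = (((bs * (k : Int)).toNat : Nat) : Int) := by omega
    have e4 : (0 : Int) + bs * (k : Int) + bs
        = ((((bs * (k : Int)).toNat + bs.toNat : Nat)) : Int) := by push_cast; omega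
    rw [e1, e2, e4, e3, chunk_rev uv ((bs * (k : Int)).toNat) bs.toNat hiN,
        PySem.List.slice_natCast]
    congr 2
    omega
  · rw [if_neg (by omega : ¬ ((-1 : Int) < (uv.length : Int) - 1)), if_neg hn]
    simp

-- ===== VERDICT (by name: the statement is the Claim_ definition above) =====
theorem create_consecutive_groups_py_spec : Claim_equal_create_consecutive_groups_py := by
  intro uv bs p _ hpre
  unfold Spec_create_consecutive_groups_py
  unfold Pre_create_consecutive_groups_py at hpre
  obtain ⟨B, rfl⟩ : ∃ B : Nat, bs = (B : Int) := ⟨bs.toNat, (Int.toNat_of_nonneg (by omega)).symm⟩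
  have hB : 1 ≤ B := by exact_mod_cast hpre
  have hBpos : (0 : Int) < (B : Int) := by exact_mod_cast hB
  have hbridge : ∀ c : Int, 1 ≤ c →
      pvChunk (B : Int) uv.length uv c = chunksW B uv c.toNat := by
    intro c hc
    rw [pvChunk_eq_chunksW (B : Int) (by exact_mod_cast hB) uv.length uv c hc (le_refl _)]
    simp
  simp only [create_consecutive_groups_py, create_consecutive_groups_py_alt]
  by_cases hp : p = "!!"
  · subst hp
    rw [if_pos rfl, if_pos rfl]
    have hA := bang_branch uv (B : Int) hBpos
    have hmapmap : (PySem.List.pyRange 0 (uv.reverse.length : Int) (B : Int)).map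
          (fun i => (PySem.List.slice uv.reverse (some i) (some (i + (B : Int)))).reverse)
        = ((PySem.List.pyRange 0 (uv.reverse.length : Int) (B : Int)).map
            (fun i => PySem.List.slice uv.reverse (some i) (some (i + (B : Int))))).map
              List.reverse := by
      rw [List.map_map]; rfl
    have hfwd := fwd_chunks B hB uv.reverse.length uv.reverse (le_refl _)
    have hrr := chunksW_revrev B hB uv.length uv (le_refl _)
    have hfty : (if PySem.Int.mod (uv.length : Int) (B : Int) ≠ 0
                 then PySem.Int.mod (uv.length : Int) (B : Int)
                 else (B : Int)) = ((rFor B uv.length : Nat) : Int) := by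
      rw [PySem.Int.mod_natCast]
      by_cases h0 : uv.length % B = 0
      · rw [if_neg (by simp [h0])]
        unfold rFor
        rw [if_pos h0]
      · rw [if_pos (by exact_mod_cast h0)]
        unfold rFor
        rw [if_neg h0]
    have hBside : pvChunk (B : Int) uv.length uv
          (if PySem.Int.mod (uv.length : Int) (B : Int) ≠ 0
           then PySem.Int.mod (uv.length : Int) (B : Int)
           else (B : Int)) = chunksW B uv (rFor B uv.length) := by
      rw [hfty, hbridge _ (by exact_mod_cast rFor_pos B uv.length hB)]
      simp
    exact hA.trans (hmapmap.trans ((congrArg (List.map List.reverse) hfwd).trans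
      (hrr.trans (congrArg List.reverse hBside).symm)))
  · have hAside : (PySem.List.pyRange 0 ((uv.length : Nat) : Int) (B : Int)).foldl
        (fun groups i => groups ++
          [PySem.List.slice uv (some i) (some (i + (B : Int)))]) []
        = chunksW B uv B := by
      rw [PySem.List.foldl_append_singleton_eq_map
            (fun i => PySem.List.slice uv (some i) (some (i + (B : Int)))),
          List.nil_append]
      exact fwd_chunks B hB uv.length uv (le_refl _)
    have hBside : pvChunk (B : Int) uv.length uv (B : Int) = chunksW B uv B := by
      rw [hbridge _ (by exact_mod_cast hB)]
      simp
    by_cases hq : p = "!"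
    · rw [if_neg hp, if_neg hp, if_pos hq]
      exact hAside.trans hBside.symm
    · rw [if_neg hp, if_neg hp, if_neg hq]
      exact hAside.trans hBside.symm
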